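-- pv_equiv track=rewrite | github.com/blossom22/1_Baekjoon_Online_Judge__study | 6764.py | dive
-- ===== SOURCE A (Python) =====
-- def dive(a):
--     cnt = 0
--     for i in range(0,3):
--         if a[i]>a[i+1]:
--             cnt += 1
--             pass
--         else:
--             break
--     if cnt == 3:
--         return 'Fish Diving'
-- ===== SOURCE B (Python) =====
-- def dive(a):
--     head = a[:4]
--     if len(head) == 4 and sorted(head, reverse=True) == head and len(set(head)) == 4:
--         return 'Fish Diving'
-- ===== Notes on version B (the rewrite author's own statement) =====
-- stated objective: alternative
-- what changed: Instead of counting pairwise comparisons in a break-loop, B slices the first four values and tests the global property directly: the slice equals its own descending sort and has four distinct elements (sorted-descending + all-distinct = strictly decreasing).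
import Mathlib
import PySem

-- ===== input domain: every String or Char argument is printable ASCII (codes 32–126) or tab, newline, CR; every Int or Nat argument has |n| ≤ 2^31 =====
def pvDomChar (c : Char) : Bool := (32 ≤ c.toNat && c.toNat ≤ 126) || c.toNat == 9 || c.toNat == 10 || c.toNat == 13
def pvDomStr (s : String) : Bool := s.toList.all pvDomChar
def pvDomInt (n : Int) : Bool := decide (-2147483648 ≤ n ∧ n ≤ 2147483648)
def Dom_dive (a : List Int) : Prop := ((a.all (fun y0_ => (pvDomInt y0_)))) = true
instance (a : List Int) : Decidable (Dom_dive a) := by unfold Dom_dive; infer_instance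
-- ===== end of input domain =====

-- B replaces A's count-and-break comparison loop with a global test on the 4-slice:
-- it equals its own descending sort and its elements are pairwise distinct.

-- ===== PORT A =====
-- for i in range(0,3): if a[i]>a[i+1]: cnt += 1 else: break  (none = IndexError)
def diveLoop (a : List Int) : List Int → Int → Option Int
  | [], cnt => some cnt
  | i :: rest, cnt =>
    match PySem.List.pyGet? a i, PySem.List.pyGet? a (i + 1) with
    | some ai, some ai1 => if ai > ai1 then diveLoop a rest (cnt + 1) else some cnt
    | _, _ => none

def dive (a : List Int) : Option String :=
  match diveLoop a (PySem.List.pyRange 0 3 1) 0 with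
  | some cnt => if cnt = 3 then some "Fish Diving" else none
  | none => none

-- ===== PORT B =====
-- head = a[:4]; 'Fish Diving' iff len(head)==4 and sorted(head, reverse=True)==head and len(set(head))==4
def dive_alt (a : List Int) : Option String :=
  let head := PySem.List.slice a none (some 4)
  if head.length = 4 ∧ PySem.List.sorted head (fun x => x) true = head ∧
       (PySem.Set.ofList head).length = 4
  then some "Fish Diving" else none

-- ===== PRECONDITION & SPEC =====
-- Pre_ excludes exactly the inputs on which A raises IndexError (too-short lists reached by the comparisons)
def Pre_dive (a : List Int) : Prop :=
  (2 ≤ a.length ∧ a.getD 0 0 ≤ a.getD 1 0) ∨ (3 ≤ a.length ∧ a.getD 1 0 ≤ a.getD 2 0) ∨ 4 ≤ a.length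
instance (a : List Int) : Decidable (Pre_dive a) := by unfold Pre_dive; infer_instance
def pvWitness_dive : List Int := [4, 3, 2, 1]

def Spec_dive (a : List Int) (out : Option String) : Prop := out = dive_alt a
instance (a : List Int) (out : Option String) : Decidable (Spec_dive a out) := by unfold Spec_dive; infer_instance

-- ===== CLAIM (what is proved, stated in full; the proofs are below) =====
def Claim_equal_dive : Prop := ∀ (a : List Int), Dom_dive a → Pre_dive a → Spec_dive a (dive a)

-- ===== LEMMAS AND PROOFS =====

theorem pyRange03 : PySem.List.pyRange 0 3 1 = [0, 1, 2] := by decide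

-- the heart of B: a 4-element list equals its own descending sort and is all-distinct iff strictly decreasing
theorem key4 (x0 x1 x2 x3 : Int) :
    (PySem.List.sorted [x0, x1, x2, x3] (fun x => x) true = [x0, x1, x2, x3] ∧
      (PySem.Set.ofList [x0, x1, x2, x3]).length = 4)
    ↔ (x0 > x1 ∧ x1 > x2 ∧ x2 > x3) := by
  constructor
  · rintro ⟨hs, hn⟩
    have p := PySem.List.sorted_pairwise_rev (xs := [x0, x1, x2, x3]) (key := fun x => x)
    rw [hs] at p
    simp [List.pairwise_cons] at p
    simp [PySem.Set.ofList, PySem.Set.add, PySem.Set.contains, List.foldl] at hn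
    split_ifs at hn <;> simp_all <;> omega
  · rintro ⟨h01, h12, h23⟩
    constructor
    · apply PySem.List.sorted_rev_eq_self_of_pairwise
      simp [List.pairwise_cons]
      omega
    · simp [PySem.Set.ofList, PySem.Set.add, PySem.Set.contains, List.foldl]
      split_ifs <;> simp_all <;> omega

-- ===== VERDICT (by name: the statement is the Claim_ definition above) =====
theorem dive_spec : Claim_equal_dive := by
  intro a _ hpre
  unfold Spec_dive
  match a with
  | [] => simp [Pre_dive] at hpre
  | [x0] => simp [Pre_dive] at hpre
  | [x0, x1] =>
    simp [Pre_dive] at hpre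
    simp [dive, dive_alt, pyRange03, diveLoop, PySem.List.pyGet?, PySem.List.pyIdx?,
      PySem.List.slice, PySem.List.clampIdx, show ¬ x1 < x0 from by omega]
  | [x0, x1, x2] =>
    simp [Pre_dive] at hpre
    rcases hpre with h | h
    · simp [dive, dive_alt, pyRange03, diveLoop, PySem.List.pyGet?, PySem.List.pyIdx?,
        PySem.List.slice, PySem.List.clampIdx, show ¬ x1 < x0 from by omega]
    · simp [dive, dive_alt, pyRange03, diveLoop, PySem.List.pyGet?, PySem.List.pyIdx?,
        PySem.List.slice, PySem.List.clampIdx, show ¬ x2 < x1 from by omega]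
      split_ifs <;> simp
  | x0 :: x1 :: x2 :: x3 :: rest =>
    have hsl : PySem.List.slice (x0 :: x1 :: x2 :: x3 :: rest) none (some 4) = [x0, x1, x2, x3] := by
      simp [pysem, List.take]
    simp only [dive, dive_alt, pyRange03, diveLoop, hsl]
    simp only [key4]
    have c1 : (0:Int) ≤ (rest.length:Int) + 1 + 1 + 1 := by omega
    have c2 : (0:Int) ≤ (rest.length:Int) + 1 + 1 := by omega
    have c3 : (2:Int) ≤ (rest.length:Int) + 1 + 1 + 1 := by omega
    have c4 : (3:Int) ≤ (rest.length:Int) + 1 + 1 + 1 := by omega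
    by_cases h01 : x1 < x0 <;> by_cases h12 : x2 < x1 <;> by_cases h23 : x3 < x2 <;>
      simp [PySem.List.pyGet?, PySem.List.pyIdx?, h01, h12, h23, c1, c2, c3, c4]
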